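-- pv_equiv track=rewrite | github.com/gan-ta/Algorithm | programmers/[프로그래머스]풍선 터트리기.py | solution
-- ===== SOURCE A (Python) =====
-- import math
--
-- def solution(a):
--     answer = 2
--     left_min = [0] * len(a)
--     right_min = [0] * len(a)
--
--     left, right = math.inf, math.inf
--
--     # 왼쪽 최소값 저장
--     for i in range(len(a)):
--         if left > a[i]:
--             left = a[i]
--         left_min[i] = left
--
--     # 오른쪽 최소값 저장
--     for i in range(len(a) - 1, -1, -1):
--         if right > a[i]:
--             right = a[i]
--         right_min[i] = right
--
--     # 수마다 확인
--     for i in range(1, len(a) - 1):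
--         if a[i] > left_min[i - 1] and a[i] > right_min[i + 1]:
--             continue
--         answer += 1
--
--     return answer
-- ===== SOURCE B (Python) =====
-- def solution(a):
--     return 2 + sum(
--         1
--         for i in range(1, len(a) - 1)
--         if not (a[i] > min(a[:i]) and a[i] > min(a[i + 1:]))
--     )
-- ===== Notes on version B (the rewrite author's own statement) =====
-- stated objective: simpler
-- what changed: Drops both precomputed prefix-min/suffix-min tables and the explicit counting loop; B is a single comprehension that compares a[i] directly against min(a[:i]) and min(a[i+1:]), rescanning the slices each iteration.
import Mathlib
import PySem

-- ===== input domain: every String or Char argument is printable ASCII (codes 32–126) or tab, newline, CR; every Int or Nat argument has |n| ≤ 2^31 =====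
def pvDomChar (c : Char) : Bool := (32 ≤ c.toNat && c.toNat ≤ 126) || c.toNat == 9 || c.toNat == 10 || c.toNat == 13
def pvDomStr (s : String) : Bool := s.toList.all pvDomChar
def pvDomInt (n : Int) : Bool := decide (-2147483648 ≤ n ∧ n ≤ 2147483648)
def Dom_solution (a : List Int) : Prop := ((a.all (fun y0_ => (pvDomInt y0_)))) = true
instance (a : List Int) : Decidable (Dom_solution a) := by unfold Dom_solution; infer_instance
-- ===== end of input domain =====

-- B replaces A's two precomputed prefix-min/suffix-min tables by direct rescans of min(a[:i]) and
-- min(a[i+1:]) inside one comprehension (simpler; neither program mutates `a`).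

-- ===== PORT A =====
-- math.inf is modelled as `none : Option Int`; `infGt r x` is Python's `left > a[i]` with left possibly inf.
def infGt (r : Option Int) (x : Int) : Bool :=
  match r with
  | none => true
  | some v => decide (v > x)

-- Python's `a[i] > m` where m was read from left_min/right_min (`none` = math.inf, on which `>` is False).
def valGtInf (x : Int) (r : Option Int) : Bool :=
  match r with
  | none => false
  | some v => decide (x > v)

-- Body of BOTH of A's scan loops (they are textually identical in A):
-- `if left > a[i]: left = a[i]` then `left_min[i] = left`; `[0]*len(a)` is replicate (some 0),
-- in-place assignment is pySetD; every index A reads or writes is in range, so no default fires.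
def scanStep (a : List Int) (st : Option Int × List (Option Int)) (i : Int) :
    Option Int × List (Option Int) :=
  let ai := PySem.List.pyGetD a i 0
  let m := if infGt st.1 ai then some ai else st.1
  (m, PySem.List.pySetD st.2 i m)

def solution (a : List Int) : Int :=
  let left_min := ((PySem.List.pyRange 0 (a.length : Int) 1).foldl (scanStep a)
      (none, List.replicate a.length (some 0))).2
  let right_min := ((PySem.List.pyRange ((a.length : Int) - 1) (-1) (-1)).foldl (scanStep a)
      (none, List.replicate a.length (some 0))).2
  (PySem.List.pyRange 1 ((a.length : Int) - 1) 1).foldl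
    (fun ans i =>
      if valGtInf (PySem.List.pyGetD a i 0) (PySem.List.pyGetD left_min (i - 1) none) &&
         valGtInf (PySem.List.pyGetD a i 0) (PySem.List.pyGetD right_min (i + 1) none)
      then ans else ans + 1) 2

-- ===== PORT B =====
-- `min(slice)` is PySem.List.min?; both slices are nonempty for every i the range visits, so the
-- `none` (Python ValueError) branch is never taken.
def solution_alt (a : List Int) : Int :=
  2 + (((PySem.List.pyRange 1 ((a.length : Int) - 1) 1).filter
      (fun i =>
        let ai := PySem.List.pyGetD a i 0
        !((match PySem.List.min? (PySem.List.slice a none (some i)) (fun x => x) with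
            | some m => decide (ai > m)
            | none => false) &&
          (match PySem.List.min? (PySem.List.slice a (some (i + 1)) none) (fun x => x) with
            | some m => decide (ai > m)
            | none => false)))).length : Int)

-- ===== PRECONDITION & SPEC =====
def Spec_solution (a : List Int) (out : Int) : Prop := out = solution_alt a
instance (a : List Int) (out : Int) : Decidable (Spec_solution a out) := by unfold Spec_solution; infer_instance

-- ===== CLAIM (what is proved, stated in full; the proofs are below) =====
def Claim_equal_solution : Prop := ∀ (a : List Int), Dom_solution a → Spec_solution a (solution a)

-- ===== LEMMAS AND PROOFS =====

-- the running-min update of A's scan loops, as a standalone function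
def pstep (r : Option Int) (x : Int) : Option Int := if infGt r x then some x else r

-- running min of a whole list, starting from inf
def pmin (l : List Int) : Option Int := l.foldl pstep none

lemma pstep_some (v x : Int) : pstep (some v) x = some (min v x) := by
  simp only [pstep, infGt]
  split_ifs with h <;> simp_all <;> omega

lemma foldl_pstep_some (l : List Int) (v : Int) :
    l.foldl pstep (some v) = some (l.foldl min v) := by
  induction l generalizing v with
  | nil => rfl
  | cons x t ih => simp [List.foldl_cons, pstep_some, ih]

lemma pmin_cons (x : Int) (t : List Int) : pmin (x :: t) = some (t.foldl min x) := by
  simp [pmin, List.foldl_cons, pstep, infGt, foldl_pstep_some]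

lemma pmin_eq_min? (l : List Int) :
    pmin l = PySem.List.min? l (fun x => x) := by
  cases l with
  | nil => rfl
  | cons x t => rw [PySem.List.min?_id_cons, pmin_cons]

lemma pmin_append_singleton (l : List Int) (x : Int) :
    pmin (l ++ [x]) = pstep (pmin l) x := by
  simp [pmin, List.foldl_append]

lemma pstep_pmin_comm (t : List Int) (x : Int) : pstep (pmin t) x = pmin (x :: t) := by
  cases t with
  | nil => rfl
  | cons y u =>
      rw [pmin_cons, pmin_cons, pstep_some]
      have h1 : List.foldl min (min x y) u = min x (List.foldl min y u) := List.foldl_assoc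
      simp [List.foldl_cons, h1, min_comm]

lemma pmin_reverse (l : List Int) : pmin l.reverse = pmin l := by
  induction l with
  | nil => rfl
  | cons x t ih =>
      rw [List.reverse_cons, pmin_append_singleton, ih, pstep_pmin_comm]

-- A's left pass: after the first m iterations the accumulator is the running min of a.take m
-- and every already-written slot j holds the prefix min of a.take (j+1).
lemma leftInv (a : List Int) (m : Nat) (hm : m ≤ a.length) :
    ((PySem.List.pyRange 0 (m : Int) 1).foldl (scanStep a)
        (none, List.replicate a.length (some 0))).1 = pmin (a.take m) ∧
    ((PySem.List.pyRange 0 (m : Int) 1).foldl (scanStep a)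
        (none, List.replicate a.length (some 0))).2.length = a.length ∧
    ∀ j : Nat, j < m →
      ((PySem.List.pyRange 0 (m : Int) 1).foldl (scanStep a)
        (none, List.replicate a.length (some 0))).2[j]? = some (pmin (a.take (j + 1))) := by
  induction m with
  | zero =>
      rw [PySem.List.pyRange_one_eq_nil (by omega)]
      simp [pmin]
  | succ m ih =>
      obtain ⟨h1, h2, h3⟩ := ih (by omega)
      have hmlt : m < a.length := by omega
      have hrange : PySem.List.pyRange 0 ((m + 1 : Nat) : Int) 1
          = PySem.List.pyRange 0 (m : Int) 1 ++ [(m : Int)] := by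
        push_cast
        exact PySem.List.pyRange_one_succ_right (by omega)
      have hai : PySem.List.pyGetD a (m : Int) 0 = a[m] := by
        rw [PySem.List.pyGetD_natCast, List.getD_eq_getElem?_getD, List.getElem?_eq_getElem hmlt]
        rfl
      have htake : a.take (m + 1) = a.take m ++ [a[m]] := by
        rw [List.take_succ, List.getElem?_eq_getElem hmlt]
        rfl
      rw [hrange, List.foldl_append]
      refine ⟨?_, ?_, ?_⟩
      · simp only [List.foldl_cons, List.foldl_nil, scanStep, hai]
        rw [htake, pmin_append_singleton, h1]
        rfl
      · simp only [List.foldl_cons, List.foldl_nil, scanStep]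
        rw [PySem.List.pySetD_natCast, List.length_set, h2]
      · intro j hj
        simp only [List.foldl_cons, List.foldl_nil, scanStep, hai]
        rw [PySem.List.pySetD_natCast, List.getElem?_set]
        rcases Nat.lt_succ_iff_lt_or_eq.mp hj with hjm | hjm
        · rw [if_neg (by omega), h3 j hjm]
        · subst hjm
          rw [if_pos rfl, if_pos (by omega), htake, pmin_append_singleton, h1]
          rfl

-- A's right pass processes indices m-1, …, 0 (the reverse of range m): each visited slot j ends
-- holding the running min (seeded with r) of a[j..m-1] read right-to-left; unvisited slots keep L.
lemma rightInvAux (a : List Int) (m : Nat) (hm : m ≤ a.length) (r : Option Int)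
    (L : List (Option Int)) (hL : L.length = a.length) :
    (((PySem.List.pyRange 0 (m : Int) 1).reverse.foldl (scanStep a) (r, L)).1
        = (a.take m).reverse.foldl pstep r) ∧
    ((PySem.List.pyRange 0 (m : Int) 1).reverse.foldl (scanStep a) (r, L)).2.length = a.length ∧
    ∀ j : Nat, j < a.length →
      ((PySem.List.pyRange 0 (m : Int) 1).reverse.foldl (scanStep a) (r, L)).2[j]? =
        if j < m then some (((a.take m).drop j).reverse.foldl pstep r) else L[j]? := by
  induction m generalizing r L with
  | zero =>
      rw [PySem.List.pyRange_one_eq_nil (by omega)]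
      exact ⟨rfl, hL, fun j hj => by simp⟩
  | succ m ih =>
      have hmlt : m < a.length := by omega
      have hrange : PySem.List.pyRange 0 ((m + 1 : Nat) : Int) 1
          = PySem.List.pyRange 0 (m : Int) 1 ++ [(m : Int)] := by
        push_cast
        exact PySem.List.pyRange_one_succ_right (by omega)
      have hai : PySem.List.pyGetD a (m : Int) 0 = a[m] := by
        rw [PySem.List.pyGetD_natCast, List.getD_eq_getElem?_getD, List.getElem?_eq_getElem hmlt]
        rfl
      have htake : a.take (m + 1) = a.take m ++ [a[m]] := by
        rw [List.take_succ, List.getElem?_eq_getElem hmlt]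
        rfl
      have hlen : (L.set m (pstep r a[m])).length = a.length := by
        rw [List.length_set, hL]
      have hstep : scanStep a (r, L) (m : Int) = (pstep r a[m], L.set m (pstep r a[m])) := by
        simp only [scanStep, hai, PySem.List.pySetD_natCast, pstep]
      obtain ⟨h1, h2, h3⟩ := ih (by omega) (pstep r a[m]) (L.set m (pstep r a[m])) hlen
      rw [hrange, List.reverse_append, List.reverse_singleton, List.singleton_append,
        List.foldl_cons, hstep]
      have hlentake : (a.take m).length = m := List.length_take_of_le (le_of_lt hmlt)
      refine ⟨?_, h2, ?_⟩
      · rw [h1, htake, List.reverse_append, List.reverse_singleton, List.singleton_append,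
          List.foldl_cons]
      · intro j hj
        rw [h3 j hj]
        by_cases hjm : j < m
        · rw [if_pos hjm, if_pos (by omega), htake,
            List.drop_append_of_le_length (by omega),
            List.reverse_append, List.reverse_singleton, List.singleton_append, List.foldl_cons]
        · by_cases hjem : j = m
          · subst hjem
            rw [if_neg hjm, if_pos (by omega), List.getElem?_set, if_pos rfl,
              if_pos (by omega), htake, List.drop_append_of_le_length (by omega)]
            have hnil : (List.take j a).drop j = [] := by
              rw [List.drop_eq_nil_iff]
              simp
            rw [hnil, List.nil_append, List.reverse_singleton, List.foldl_cons, List.foldl_nil]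
          · rw [if_neg hjm, if_neg (by omega), List.getElem?_set, if_neg (by omega)]

lemma foldl_count (c : Int → Bool) (r : List Int) (ans : Int) :
    r.foldl (fun ans i => if c i then ans else ans + 1) ans
      = ans + ((r.filter (fun i => !c i)).length : Int) := by
  induction r generalizing ans with
  | nil => simp
  | cons x t ih =>
      cases h : c x <;> simp [List.foldl_cons, h, ih] <;> push_cast <;> ring

-- ===== VERDICT (by name: the statement is the Claim_ definition above) =====
theorem solution_spec : Claim_equal_solution := by
  intro a _
  unfold Spec_solution solution solution_alt
  rw [foldl_count]
  congr 1
  have hrev : PySem.List.pyRange ((a.length : Int) - 1) (-1) (-1)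
      = (PySem.List.pyRange 0 (a.length : Int) 1).reverse := by
    rw [PySem.List.pyRange_neg_one_eq_reverse]
    norm_num
  obtain ⟨_, hLlen, hL⟩ := leftInv a a.length le_rfl
  obtain ⟨_, hRlen, hR⟩ := rightInvAux a a.length le_rfl none
      (List.replicate a.length (some 0)) (by simp)
  rw [hrev] at *
  congr 1
  congr 1
  apply List.filter_congr
  intro i hi
  obtain ⟨hi1, hi2⟩ := PySem.List.mem_pyRange_one.mp hi
  have hiN : i.toNat < a.length := by omega
  -- the left table entry at i-1 is the prefix min of a.take i
  have hleft : PySem.List.pyGetD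
      ((PySem.List.pyRange 0 (a.length : Int) 1).foldl (scanStep a)
        (none, List.replicate a.length (some 0))).2 (i - 1) none
      = pmin (a.take i.toNat) := by
    rw [PySem.List.pyGetD_eq_getElem _ none (by omega) (by rw [hLlen]; omega)]
    have h2 := hL (i - 1).toNat (by omega)
    have hidx : (i - 1).toNat + 1 = i.toNat := by omega
    rw [hidx, List.getElem?_eq_getElem (by rw [hLlen]; omega)] at h2
    simpa using h2
  -- the right table entry at i+1 is the (reversed) suffix min of a.drop (i+1)
  have hright : PySem.List.pyGetD
      (((PySem.List.pyRange 0 (a.length : Int) 1).reverse).foldl (scanStep a)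
        (none, List.replicate a.length (some 0))).2 (i + 1) none
      = pmin (a.drop (i + 1).toNat) := by
    rw [PySem.List.pyGetD_eq_getElem _ none (by omega) (by rw [hRlen]; omega)]
    have h2 := hR (i + 1).toNat (by omega)
    rw [if_pos (by omega)] at h2
    have hdrop : (a.take a.length).drop (i + 1).toNat = a.drop (i + 1).toNat := by
      rw [List.take_length]
    have hfold : (a.drop (i + 1).toNat).reverse.foldl pstep none
        = pmin (a.drop (i + 1).toNat) := by
      rw [← pmin_reverse]
      rfl
    rw [hdrop, hfold, List.getElem?_eq_getElem (by rw [hRlen]; omega)] at h2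
    simpa using h2
  rw [hleft, hright,
    PySem.List.slice_to a (by omega : (0:Int) ≤ i),
    PySem.List.slice_from a (by omega : (0:Int) ≤ i + 1),
    ← pmin_eq_min?, ← pmin_eq_min?]
  cases pmin (a.take i.toNat) <;> cases pmin (a.drop (i + 1).toNat) <;>
    simp [valGtInf]
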